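-- pv_equiv track=rewrite | github.com/DouglasTakada/WSU_Classes | CPT_S_355/HW3/HW3.py | merge_logs
-- ===== SOURCE A (Python) =====
-- def combine_dict(dict1, dict2):
--      new_dict = {}
--      for key in dict1:
--           if new_dict.get(key) is None:
--                new_dict[key] = 0
--           new_dict[key] += dict1.get(key)
--      for key in dict2:
--           if new_dict.get(key) is None:
--                new_dict[key] = 0
--           new_dict[key] += dict2.get(key)
--      return new_dict
--
-- def merge_logs(lst):
--      new_dict = {}
--      for dicts in lst:
--           for key in dicts.keys():
--                if new_dict.get(key) is None:
--                     new_dict[key] = {}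
--                new_dict[key] = combine_dict(new_dict[key], dicts.get(key))
--
--      return new_dict
-- ===== SOURCE B (Python) =====
-- def merge_logs(lst):
--     acc = {}
--     for d in lst:
--         for key, inner in d.items():
--             tgt = acc.setdefault(key, {})
--             for k, v in inner.items():
--                 tgt[k] = tgt.get(k, 0) + v
--     return acc
-- ===== Notes on version B (the rewrite author's own statement) =====
-- stated objective: faster
-- what changed: B accumulates sums directly into the nested result dicts in a single in-place pass (setdefault + tgt[k]=tgt.get(k,0)+v), instead of A's rebuilding a fresh inner dict with combine_dict (which re-copies the whole accumulated inner dict) for every key of every log.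
import Mathlib
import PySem

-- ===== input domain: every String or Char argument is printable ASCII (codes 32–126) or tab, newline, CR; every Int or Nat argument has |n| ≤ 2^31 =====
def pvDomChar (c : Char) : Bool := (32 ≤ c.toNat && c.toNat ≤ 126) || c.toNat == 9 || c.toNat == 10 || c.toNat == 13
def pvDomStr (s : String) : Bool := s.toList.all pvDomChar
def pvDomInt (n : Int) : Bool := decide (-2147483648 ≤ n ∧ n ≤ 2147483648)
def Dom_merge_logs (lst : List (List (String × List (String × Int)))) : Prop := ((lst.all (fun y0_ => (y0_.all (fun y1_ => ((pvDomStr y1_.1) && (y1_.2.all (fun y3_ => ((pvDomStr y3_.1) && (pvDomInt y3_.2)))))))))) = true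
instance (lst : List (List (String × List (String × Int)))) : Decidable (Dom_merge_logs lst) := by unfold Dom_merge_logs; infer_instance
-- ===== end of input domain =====

-- ===== PORT A =====
-- Python A: combine_dict rebuilds a fresh dict from dict1 then dict2, summing values.
def combine_dict (dict1 dict2 : PySem.Dict String Int) : PySem.Dict String Int :=
  let nd := dict1.keys.foldl (fun nd key =>
    let nd := if (nd.get? key).isNone then nd.insert key 0 else nd
    nd.insert key (nd.getD key 0 + dict1.getD key 0)) PySem.Dict.empty
  dict2.keys.foldl (fun nd key =>
    let nd := if (nd.get? key).isNone then nd.insert key 0 else nd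
    nd.insert key (nd.getD key 0 + dict2.getD key 0)) nd

def merge_logs (lst : List (List (String × List (String × Int)))) : List (String × List (String × Int)) :=
  let nd := lst.foldl (fun nd dl =>
    let D := PySem.Dict.ofList dl
    D.keys.foldl (fun nd key =>
      let nd := if (nd.get? key).isNone then nd.insert key PySem.Dict.empty else nd
      nd.insert key (combine_dict (nd.getD key PySem.Dict.empty)
                                  (PySem.Dict.ofList (D.getD key [])))) nd)
    PySem.Dict.empty
  nd.items.map (fun p => (p.1, p.2.items))

-- ===== PORT B =====
-- B accumulates sums directly into the nested result dicts in one pass; no copy-rebuild.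
-- tgt = acc.setdefault(key, {}); tgt[k] = tgt.get(k, 0) + v  (in-place mutation of acc[key])
def merge_logs_alt (lst : List (List (String × List (String × Int)))) : List (String × List (String × Int)) :=
  let acc := lst.foldl (fun acc dl =>
    (PySem.Dict.ofList dl).items.foldl (fun acc kp =>
      acc.insert kp.1 ((PySem.Dict.ofList kp.2).items.foldl
        (fun tgt q => tgt.insert q.1 (tgt.getD q.1 0 + q.2))
        (acc.getD kp.1 PySem.Dict.empty))) acc) PySem.Dict.empty
  acc.items.map (fun p => (p.1, p.2.items))

-- ===== PRECONDITION & SPEC =====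
def Spec_merge_logs (lst : List (List (String × List (String × Int)))) (out : List (String × List (String × Int))) : Prop := out = merge_logs_alt lst
instance (lst : List (List (String × List (String × Int)))) (out : List (String × List (String × Int))) : Decidable (Spec_merge_logs lst out) := by unfold Spec_merge_logs; infer_instance

-- ===== CLAIM (what is proved, stated in full; the proofs are below) =====
def Claim_equal_merge_logs : Prop := ∀ (lst : List (List (String × List (String × Int)))), Dom_merge_logs lst → Spec_merge_logs lst (merge_logs lst)

-- ===== LEMMAS AND PROOFS =====

-- the common per-entry step: nd[k] = nd.get(k, 0) + v
def innerStep (nd : PySem.Dict String Int) (q : String × Int) : PySem.Dict String Int :=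
  nd.insert q.1 (nd.getD q.1 0 + q.2)

-- A's outer per-key step and B's outer per-pair step
def Astep (nd : PySem.Dict String (PySem.Dict String Int)) (kp : String × List (String × Int)) :
    PySem.Dict String (PySem.Dict String Int) :=
  let nd' := if (nd.get? kp.1).isNone then nd.insert kp.1 PySem.Dict.empty else nd
  nd'.insert kp.1 (combine_dict (nd'.getD kp.1 PySem.Dict.empty) (PySem.Dict.ofList kp.2))

def Bstep (nd : PySem.Dict String (PySem.Dict String Int)) (kp : String × List (String × Int)) :
    PySem.Dict String (PySem.Dict String Int) :=
  nd.insert kp.1 ((PySem.Dict.ofList kp.2).items.foldl innerStep (nd.getD kp.1 PySem.Dict.empty))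

def MergeInv (nd : PySem.Dict String (PySem.Dict String Int)) : Prop :=
  ∀ k, (nd.getD k PySem.Dict.empty).keys.Nodup

-- A's guarded inner body equals the unguarded innerStep
theorem step_eq (nd : PySem.Dict String Int) (k : String) (v : Int) :
    (let nd' := if (nd.get? k).isNone then nd.insert k 0 else nd
     nd'.insert k (nd'.getD k 0 + v)) = innerStep nd (k, v) := by
  cases h : nd.get? k with
  | some w =>
    have hg : nd.getD k 0 = w := by rw [PySem.Dict.getD_eq_get?_getD, h]; rfl
    simp [innerStep, hg]
  | none =>
    have hg : nd.getD k 0 = 0 := by rw [PySem.Dict.getD_eq_get?_getD, h]; rfl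
    simp [innerStep, hg, PySem.Dict.insert_insert_self, PySem.Dict.getD_insert_self]

theorem innerStep_nodup (l : List (String × Int)) (d : PySem.Dict String Int)
    (h : d.keys.Nodup) : (l.foldl innerStep d).keys.Nodup :=
  PySem.Dict.nodup_keys_foldl_insert_key l Prod.fst (fun nd q => nd.getD q.1 0 + q.2) d h

-- a fold of innerStep over fresh, distinct keys just appends the pairs
theorem rebuild_items (l : List (String × Int)) (acc : PySem.Dict String Int)
    (hfresh : ∀ p ∈ l, acc.contains p.1 = false) (hnd : (l.map Prod.fst).Nodup) :
    (l.foldl innerStep acc).items = acc.items ++ l := by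
  induction l generalizing acc with
  | nil => simp
  | cons p t ih =>
    obtain ⟨k, v⟩ := p
    simp only [List.foldl_cons]
    have hf : acc.contains k = false := hfresh (k, v) (by simp)
    have hstep : innerStep acc (k, v) = acc.insert k v := by
      simp [innerStep, PySem.Dict.getD_of_not_contains acc 0 hf]
    rw [hstep, ih]
    · rw [PySem.Dict.items_insert_of_not_contains _ _ hf]; simp
    · intro q hq
      rw [PySem.Dict.contains_insert]
      simp only [List.map_cons, List.nodup_cons] at hnd
      have : q.1 ≠ k := fun e => hnd.1 (e ▸ List.mem_map_of_mem hq)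
      simp [this, hfresh q (List.mem_cons_of_mem _ hq)]
    · simp only [List.map_cons, List.nodup_cons] at hnd; exact hnd.2

-- rewriting a combine_dict loop over keys as an innerStep fold over items
theorem loop_eq (d : PySem.Dict String Int) (acc : PySem.Dict String Int) (hnd : d.keys.Nodup) :
    d.keys.foldl (fun nd key =>
      let nd := if (nd.get? key).isNone then nd.insert key 0 else nd
      nd.insert key (nd.getD key 0 + d.getD key 0)) acc = d.items.foldl innerStep acc := by
  rw [PySem.Dict.items_eq_map_keys d hnd 0, List.foldl_map]
  exact PySem.List.foldl_congr_mem _ _ _ _ (fun nd key _ => step_eq nd key (d.getD key 0))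

-- A's first combine_dict loop reproduces dict1
theorem rebuild (d : PySem.Dict String Int) (hnd : d.keys.Nodup) :
    d.items.foldl innerStep PySem.Dict.empty = d := by
  apply PySem.Dict.ext
  rw [rebuild_items _ _ (fun p _ => by simp [PySem.Dict.contains_empty]) hnd]
  rfl

theorem combine_eq (d1 d2 : PySem.Dict String Int) (h1 : d1.keys.Nodup) (h2 : d2.keys.Nodup) :
    combine_dict d1 d2 = d2.items.foldl innerStep d1 := by
  unfold combine_dict
  rw [loop_eq d1 _ h1, rebuild d1 h1, loop_eq d2 _ h2]

theorem AB_step (nd : PySem.Dict String (PySem.Dict String Int)) (hinv : MergeInv nd)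
    (kp : String × List (String × Int)) : Astep nd kp = Bstep nd kp := by
  cases h : nd.get? kp.1 with
  | some P =>
    have hg : nd.getD kp.1 PySem.Dict.empty = P := by
      rw [PySem.Dict.getD_eq_get?_getD, h]; rfl
    have hP : P.keys.Nodup := hg ▸ hinv kp.1
    simp [Astep, Bstep, h, hg,
      combine_eq P (PySem.Dict.ofList kp.2) hP (PySem.Dict.nodup_keys_ofList kp.2)]
  | none =>
    have hg : nd.getD kp.1 PySem.Dict.empty = PySem.Dict.empty := by
      rw [PySem.Dict.getD_eq_get?_getD, h]; rfl
    simp [Astep, Bstep, h, hg, PySem.Dict.insert_insert_self, PySem.Dict.getD_insert_self,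
      combine_eq PySem.Dict.empty (PySem.Dict.ofList kp.2) (by simp [PySem.Dict.keys_empty])
        (PySem.Dict.nodup_keys_ofList kp.2)]

theorem Bstep_inv (nd : PySem.Dict String (PySem.Dict String Int)) (hinv : MergeInv nd)
    (kp : String × List (String × Int)) : MergeInv (Bstep nd kp) := by
  intro k
  unfold Bstep
  rw [PySem.Dict.getD_insert]
  split
  · exact innerStep_nodup _ _ (hinv kp.1)
  · exact hinv k

theorem fold_AB (l : List (String × List (String × Int)))
    (nd : PySem.Dict String (PySem.Dict String Int)) (hinv : MergeInv nd) :
    l.foldl Astep nd = l.foldl Bstep nd ∧ MergeInv (l.foldl Bstep nd) := by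
  induction l generalizing nd with
  | nil => exact ⟨rfl, hinv⟩
  | cons kp t ih =>
    simp only [List.foldl_cons, AB_step nd hinv kp]
    exact ih (Bstep nd kp) (Bstep_inv nd hinv kp)

-- A's per-log keys loop equals B's per-log items loop, under the invariant
theorem outer_body_eq (dl : List (String × List (String × Int)))
    (nd : PySem.Dict String (PySem.Dict String Int)) (hinv : MergeInv nd) :
    (let D := PySem.Dict.ofList dl
     D.keys.foldl (fun nd key =>
       let nd := if (nd.get? key).isNone then nd.insert key PySem.Dict.empty else nd
       nd.insert key (combine_dict (nd.getD key PySem.Dict.empty)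
                                   (PySem.Dict.ofList (D.getD key [])))) nd) =
    (PySem.Dict.ofList dl).items.foldl Bstep nd := by
  show (PySem.Dict.ofList dl).keys.foldl
      (fun nd key => Astep nd (key, (PySem.Dict.ofList dl).getD key [])) nd = _
  have h : (PySem.Dict.ofList dl).keys.foldl
      (fun nd key => Astep nd (key, (PySem.Dict.ofList dl).getD key [])) nd
      = (PySem.Dict.ofList dl).items.foldl Astep nd := by
    rw [PySem.Dict.items_eq_map_keys (PySem.Dict.ofList dl) (PySem.Dict.nodup_keys_ofList dl) [],
      List.foldl_map]
  rw [h]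
  exact (fold_AB _ nd hinv).1

-- ===== VERDICT (by name: the statement is the Claim_ definition above) =====
theorem fold_outer (lst : List (List (String × List (String × Int))))
    (nd : PySem.Dict String (PySem.Dict String Int)) (hinv : MergeInv nd) :
    lst.foldl (fun nd dl =>
      let D := PySem.Dict.ofList dl
      D.keys.foldl (fun nd key =>
        let nd := if (nd.get? key).isNone then nd.insert key PySem.Dict.empty else nd
        nd.insert key (combine_dict (nd.getD key PySem.Dict.empty)
                                    (PySem.Dict.ofList (D.getD key [])))) nd) nd =
    lst.foldl (fun acc dl => (PySem.Dict.ofList dl).items.foldl Bstep acc) nd := by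
  induction lst generalizing nd with
  | nil => rfl
  | cons dl t ih =>
    simp only [List.foldl_cons]
    rw [outer_body_eq dl nd hinv]
    exact ih _ (fold_AB _ nd hinv).2

theorem MergeInv_empty : MergeInv PySem.Dict.empty := by
  intro k
  simp [PySem.Dict.getD_empty, PySem.Dict.keys_empty]

-- ===== VERDICT (by name: the statement is the Claim_ definition above) =====
theorem merge_logs_spec : Claim_equal_merge_logs := by
  intro lst _
  show merge_logs lst = merge_logs_alt lst
  unfold merge_logs merge_logs_alt
  rw [fold_outer lst PySem.Dict.empty MergeInv_empty]
  rfl
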